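-- pv_equiv track=rewrite | github.com/cherryn1114/Silmari-knit_with_me | lib/abbr_extract.py | guess_primary_key
-- ===== SOURCE A (Python) =====
-- from typing import List, Dict
--
-- def guess_primary_key(abbrs: List[str], title: str) -> str:
--     """
--     추출된 약어들 중 '대표키' 후보를 하나 골라줌.
--     규칙:
--       1) k2tog/p2tog/ssk/ssp/m1l/m1r/yo 등 핵심 우선
--       2) 1x1 rib / 2x2 rib / garter / stockinette 등 조직
--       3) 2/2 RC/LC 같은 교차
--       4) 없으면 제목 그대로
--     """
--     order = [
--         "k2tog","p2tog","ssk","ssp","m1l","m1r","yo",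
--         "ktbl","ptbl","rc","lc","co","bo","pm","sm","dpn",
--         "1x1 rib","2x2 rib","rib","garter","st-st","stockinette","moss st","g-st",
--         "wyif","wyib","yfwd","ybk","mc","cc","pu","sl",
--     ]
--     s = set(abbrs)
--     for k in order:
--         if k in s:
--             return k
--     # 교차(2/2 RC) 같은 복합 키가 있으면 그중 하나
--     if abbrs:
--         return abbrs[0]
--     return title.strip()
-- ===== SOURCE B (Python) =====
-- from typing import List
--
-- def guess_primary_key(abbrs: List[str], title: str) -> str:
--     order = ("k2tog;p2tog;ssk;ssp;m1l;m1r;yo;"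
--              "ktbl;ptbl;rc;lc;co;bo;pm;sm;dpn;"
--              "1x1 rib;2x2 rib;rib;garter;st-st;stockinette;moss st;g-st;"
--              "wyif;wyib;yfwd;ybk;mc;cc;pu;sl").split(";")
--     best = None
--     best_rank = len(order)
--     for a in abbrs:
--         try:
--             r = order.index(a)
--         except ValueError:
--             r = len(order)
--         if best is None or r < best_rank:
--             best, best_rank = a, r
--     if best is not None:
--         return best
--     return title.strip()
-- ===== Notes on version B (the rewrite author's own statement) =====
-- stated objective: alternative
-- what changed: Instead of scanning the fixed priority list and returning the first entry present in a set of the abbreviations, B does a single explicit pass over the input abbreviations keeping the best-ranked one seen so far (rank = position in the priority string, unknown names rank last, first occurrence wins on ties), so the selection loop runs over the input, not the priority list.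
import Mathlib
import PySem

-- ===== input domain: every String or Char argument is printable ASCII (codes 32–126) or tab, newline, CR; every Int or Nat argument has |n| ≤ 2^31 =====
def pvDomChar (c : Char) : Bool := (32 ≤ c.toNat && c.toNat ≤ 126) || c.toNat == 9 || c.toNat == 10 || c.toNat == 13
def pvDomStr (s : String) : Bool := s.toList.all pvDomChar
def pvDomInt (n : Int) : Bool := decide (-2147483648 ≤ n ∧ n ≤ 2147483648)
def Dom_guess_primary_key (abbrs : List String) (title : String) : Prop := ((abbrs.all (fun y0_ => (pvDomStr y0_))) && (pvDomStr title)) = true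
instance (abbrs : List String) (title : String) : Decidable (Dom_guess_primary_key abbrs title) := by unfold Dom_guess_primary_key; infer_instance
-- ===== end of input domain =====

-- B replaces A's scan of the fixed priority list (with a set of the abbreviations)
-- by a single explicit pass over the input abbreviations that keeps the best-ranked
-- one seen so far (rank = position in a ';'-separated priority string, unknown last,
-- first occurrence wins ties); same value everywhere.

-- ===== PORT A =====
-- A: scan the fixed priority list, return the first entry found in set(abbrs);
-- else abbrs[0] if non-empty, else title.strip().
def guess_primary_key (abbrs : List String) (title : String) : String :=
  let order : List String := [
    "k2tog","p2tog","ssk","ssp","m1l","m1r","yo",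
    "ktbl","ptbl","rc","lc","co","bo","pm","sm","dpn",
    "1x1 rib","2x2 rib","rib","garter","st-st","stockinette","moss st","g-st",
    "wyif","wyib","yfwd","ybk","mc","cc","pu","sl"]
  let s : PySem.Set String := PySem.Set.ofList abbrs
  match order.find? (fun k => PySem.Set.contains s k) with
  | some k => k
  | none =>
    match abbrs with
    | a :: _ => a
    | [] => PySem.Str.strip title

-- ===== PORT B =====
-- B-side helper: the ';'-separated priority string, split once (B's `order`)
def pvOrderB : List String :=
  match PySem.Str.split?
    "k2tog;p2tog;ssk;ssp;m1l;m1r;yo;ktbl;ptbl;rc;lc;co;bo;pm;sm;dpn;1x1 rib;2x2 rib;rib;garter;st-st;stockinette;moss st;g-st;wyif;wyib;yfwd;ybk;mc;cc;pu;sl"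
    ";" with
  | some l => l
  | none => []   -- unreachable: the separator ";" is non-empty

-- B: one pass over abbrs with accumulator (best, best_rank); rank via order.index
-- (try/except ValueError -> index? with default len(order)).
def guess_primary_key_alt (abbrs : List String) (title : String) : String :=
  let order : List String := pvOrderB
  let final := abbrs.foldl
    (fun (st : Option String × Int) a =>
      let r : Int :=
        match PySem.List.index? order a with
        | some i => (i : Int)
        | none => (order.length : Int)
      if st.1.isNone || decide (r < st.2) then (some a, r) else st)
    (none, (order.length : Int))
  match final.1 with
  | some b => b
  | none => PySem.Str.strip title

-- ===== PRECONDITION & SPEC =====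
def Spec_guess_primary_key (abbrs : List String) (title : String) (out : String) : Prop := out = guess_primary_key_alt abbrs title
instance (abbrs : List String) (title : String) (out : String) : Decidable (Spec_guess_primary_key abbrs title out) := by unfold Spec_guess_primary_key; infer_instance

-- ===== CLAIM (what is proved, stated in full; the proofs are below) =====
def Claim_equal_guess_primary_key : Prop := ∀ (abbrs : List String) (title : String), Dom_guess_primary_key abbrs title → Spec_guess_primary_key abbrs title (guess_primary_key abbrs title)

-- ===== LEMMAS AND PROOFS =====

-- the priority list, named for the proofs
def pvOrder : List String := [
    "k2tog","p2tog","ssk","ssp","m1l","m1r","yo",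
    "ktbl","ptbl","rc","lc","co","bo","pm","sm","dpn",
    "1x1 rib","2x2 rib","rib","garter","st-st","stockinette","moss st","g-st",
    "wyif","wyib","yfwd","ybk","mc","cc","pu","sl"]

-- the key B computes for each abbreviation
def pvKey (a : String) : Int :=
  if a ∈ pvOrder then (pvOrder.idxOf a : Int) else (pvOrder.length : Int)

set_option maxRecDepth 8000 in
theorem pvOrder_split : pvOrderB = pvOrder := by decide

-- B's per-element rank computation is pvKey
theorem pv_rank_eq (a : String) :
    (match PySem.List.index? pvOrder a with
     | some i => (i : Int)
     | none => (pvOrder.length : Int)) = pvKey a := by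
  unfold pvKey
  rcases h : PySem.List.index? pvOrder a with _ | i
  · rw [if_neg ((PySem.List.index?_eq_none_iff _ _).mp h)]
  · rw [PySem.List.index?_eq_idxOf?] at h
    obtain ⟨hk, hget, -⟩ := List.idxOf?_eq_some_iff.mp h
    have hmem : a ∈ pvOrder := hget ▸ List.getElem_mem hk
    rw [if_pos hmem, List.idxOf_eq_getD_idxOf?, h]
    rfl

-- B's fold, once the accumulator holds (some m, pvKey m), is min?'s fold
theorem pv_fold_min (t : List String) (m : String) :
    (t.foldl
      (fun (st : Option String × Int) a =>
        let r : Int :=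
          match PySem.List.index? pvOrder a with
          | some i => (i : Int)
          | none => (pvOrder.length : Int)
        if st.1.isNone || decide (r < st.2) then (some a, r) else st)
      (some m, pvKey m)).1
    = t.foldl (fun acc x => match acc with
        | none => some x
        | some m => if pvKey x < pvKey m then some x else some m) (some m) := by
  have hfun : (fun (st : Option String × Int) a =>
      let r : Int :=
        match PySem.List.index? pvOrder a with
        | some i => (i : Int)
        | none => (pvOrder.length : Int)
      if st.1.isNone || decide (r < st.2) then (some a, r) else st)
    = (fun (st : Option String × Int) a =>
        if st.1.isNone || decide (pvKey a < st.2) then (some a, pvKey a) else st) := by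
    funext st a
    simp only [pv_rank_eq]
  rw [hfun]
  induction t generalizing m with
  | nil => rfl
  | cons x t ih =>
    simp only [List.foldl_cons, Option.isNone_some, Bool.false_or]
    by_cases h : pvKey x < pvKey m
    · rw [if_pos (by simpa using h), if_pos h]; exact ih x
    · rw [if_neg (by simpa using h), if_neg h]; exact ih m

-- B equals the min?-by-pvKey formulation
theorem pvB_min (abbrs : List String) (title : String) :
    guess_primary_key_alt abbrs title =
      match PySem.List.min? abbrs pvKey with
      | some m => m
      | none => PySem.Str.strip title := by
  cases abbrs with
  | nil => rfl
  | cons a t =>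
    show (match ((a :: t).foldl
        (fun (st : Option String × Int) a =>
          let r : Int :=
            match PySem.List.index? pvOrderB a with
            | some i => (i : Int)
            | none => (pvOrderB.length : Int)
          if st.1.isNone || decide (r < st.2) then (some a, r) else st)
        (none, (pvOrderB.length : Int))).1 with
      | some b => b
      | none => PySem.Str.strip title) = _
    rw [pvOrder_split]
    rw [List.foldl_cons]
    have h0 : (if (none : Option String).isNone
        || decide ((match PySem.List.index? pvOrder a with
            | some i => (i : Int) | none => (pvOrder.length : Int)) < (pvOrder.length : Int))
        then (some a, (match PySem.List.index? pvOrder a with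
            | some i => (i : Int) | none => (pvOrder.length : Int)))
        else ((none : Option String), (pvOrder.length : Int)))
        = (some a, pvKey a) := by
      rw [if_pos (by simp), pv_rank_eq]
    rw [h0, pv_fold_min t a]
    have h2 : PySem.List.min? (a :: t) pvKey
        = t.foldl (fun acc x => match acc with
            | none => some x
            | some m => if pvKey x < pvKey m then some x else some m) (some a) := by
      unfold PySem.List.min?
      rw [List.foldl_cons]
      congr 1
      funext acc x
      cases acc <;> rfl
    rw [h2]

-- min?'s foldl keeps the current element if nothing later is strictly smaller
theorem pv_min_fold_keep (t : List String) (key : String → Int) (m : String)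
    (h : ∀ y ∈ t, ¬ key y < key m) :
    t.foldl (fun acc x => match acc with
      | none => some x
      | some m => if key x < key m then some x else some m) (some m) = some m := by
  induction t with
  | nil => rfl
  | cons y t ih =>
    simp only [List.foldl_cons]
    rw [if_neg (h y (List.mem_cons_self))]
    exact ih (fun z hz => h z (List.mem_cons_of_mem _ hz))

-- Python min keeps the head when no later element is strictly smaller under key
theorem pv_min_head (t : List String) (key : String → Int) (m : String)
    (h : ∀ y ∈ t, ¬ key y < key m) :
    PySem.List.min? (m :: t) key = some m := by
  unfold PySem.List.min?
  rw [List.foldl_cons]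
  convert pv_min_fold_keep t key m h using 2
  funext acc x
  cases acc <;> rfl

theorem pvA_eq (abbrs : List String) (title : String) :
    guess_primary_key abbrs title =
      match pvOrder.find? (fun k => PySem.Set.contains (PySem.Set.ofList abbrs) k) with
      | some k => k
      | none =>
        match abbrs with
        | a :: _ => a
        | [] => PySem.Str.strip title := rfl

-- ===== VERDICT (by name: the statement is the Claim_ definition above) =====
theorem guess_primary_key_spec : Claim_equal_guess_primary_key := by
  intro abbrs title _
  unfold Spec_guess_primary_key
  rw [pvA_eq, pvB_min]
  cases hfind : pvOrder.find? (fun k => PySem.Set.contains (PySem.Set.ofList abbrs) k) with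
  | none =>
    have hnone : ∀ x ∈ pvOrder, x ∉ abbrs := by
      intro x hx hmem
      have := List.find?_eq_none.mp hfind x hx
      simp [PySem.Set.contains, PySem.Set.mem_ofList] at this
      exact this hmem
    cases abbrs with
    | nil => rfl
    | cons a rest =>
      have hkonst : ∀ y ∈ a :: rest, pvKey y = (pvOrder.length : Int) := by
        intro y hy
        unfold pvKey
        rw [if_neg (fun hyo => hnone y hyo hy)]
      have hmin : PySem.List.min? (a :: rest) pvKey = some a := by
        refine pv_min_head rest pvKey a ?_
        intro y hy
        rw [hkonst y (List.mem_cons_of_mem _ hy), hkonst a List.mem_cons_self]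
        omega
      rw [hmin]
  | some k =>
    obtain ⟨hpk, as, bs, heq, hprev⟩ := List.find?_eq_some_iff_append.mp hfind
    have hk_abbrs : k ∈ abbrs := by
      simpa [PySem.Set.contains, PySem.Set.mem_ofList] using hpk
    have hprev' : ∀ x ∈ as, x ∉ abbrs := by
      intro x hx hmem
      have := hprev x hx
      simp [PySem.Set.contains, PySem.Set.mem_ofList] at this
      exact this hmem
    have hkey_k : pvKey k = (as.length : Int) := by
      unfold pvKey
      rw [if_pos (by rw [heq]; exact List.mem_append_right _ List.mem_cons_self)]
      have hknotas : k ∉ as := fun h => hprev' k h hk_abbrs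
      rw [heq, List.idxOf_append_of_notMem hknotas, List.idxOf_cons_self]
      simp
    cases hmin : PySem.List.min? abbrs pvKey with
    | none =>
      rw [PySem.List.min?_eq_none_iff] at hmin
      subst hmin; cases hk_abbrs
    | some m =>
      have hm_mem : m ∈ abbrs := PySem.List.min?_mem hmin
      have hmle : pvKey m ≤ pvKey k := PySem.List.min?_isMin hmin k hk_abbrs
      rw [hkey_k] at hmle
      have haslt : as.length < pvOrder.length := by
        rw [heq]; simp
      have hm_ord : m ∈ pvOrder := by
        by_contra hno
        unfold pvKey at hmle
        rw [if_neg hno] at hmle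
        omega
      have hidx_le : pvOrder.idxOf m ≤ as.length := by
        unfold pvKey at hmle
        rw [if_pos hm_ord] at hmle
        exact_mod_cast hmle
      have hidxlt : pvOrder.idxOf m < pvOrder.length := List.idxOf_lt_length_of_mem hm_ord
      have hget : pvOrder[pvOrder.idxOf m]'hidxlt = m := List.getElem_idxOf hidxlt
      have hmk : m = k := by
        rcases Nat.lt_or_ge (pvOrder.idxOf m) as.length with hlt | hge
        · exfalso
          have hget2 : (as ++ k :: bs)[pvOrder.idxOf m]'(heq ▸ hidxlt) = m :=
            (List.getElem_of_eq heq hidxlt).symm.trans hget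
          have hmas : m ∈ as := by
            rw [List.getElem_append_left hlt] at hget2
            rw [← hget2]; exact List.getElem_mem _
          exact hprev' m hmas hm_mem
        · have heqidx : pvOrder.idxOf m = as.length := le_antisymm hidx_le hge
          have hget2 : (as ++ k :: bs)[pvOrder.idxOf m]'(heq ▸ hidxlt) = m :=
            (List.getElem_of_eq heq hidxlt).symm.trans hget
          rw [← hget2]
          rw [List.getElem_append_right (le_of_eq heqidx.symm)]
          simp [heqidx]
      rw [hmk]
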